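-- pv_equiv track=rewrite | github.com/wylee/glineenc | src/glineenc/util.py | encode_unsigned
-- ===== SOURCE A (Python) =====
-- def encode_unsigned(n: int) -> str:
--     tmp = []
--     while n >= 0b100000:
--         tmp.append(n & 0b11111)
--         n >>= 5
--     tmp = [(c | 0b100000) for c in tmp] + [n]
--     chars = [chr(i + 0b111111) for i in tmp]
--     result = "".join(chars)
--     return result
-- ===== SOURCE B (Python) =====
-- def encode_unsigned(n: int) -> str:
--     if n < 32:
--         return chr(n + 63)
--     k = (n.bit_length() + 4) // 5
--     body = [chr(((n >> (5 * i)) & 31) + 95) for i in range(k - 1)]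
--     return "".join(body) + chr((n >> (5 * (k - 1))) + 63)
-- ===== Notes on version B (the rewrite author's own statement) =====
-- stated objective: alternative
-- what changed: B replaces A's destructive shift loop (mutate n, collect chunks, two comprehensions, join) with a closed-form digit count k = (bit_length+4)//5 and non-destructive indexed extraction: a comprehension over range(k-1) reads each 5-bit group by shifting the untouched n, plus the top group; the small-input case is a direct chr.
import Mathlib
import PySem

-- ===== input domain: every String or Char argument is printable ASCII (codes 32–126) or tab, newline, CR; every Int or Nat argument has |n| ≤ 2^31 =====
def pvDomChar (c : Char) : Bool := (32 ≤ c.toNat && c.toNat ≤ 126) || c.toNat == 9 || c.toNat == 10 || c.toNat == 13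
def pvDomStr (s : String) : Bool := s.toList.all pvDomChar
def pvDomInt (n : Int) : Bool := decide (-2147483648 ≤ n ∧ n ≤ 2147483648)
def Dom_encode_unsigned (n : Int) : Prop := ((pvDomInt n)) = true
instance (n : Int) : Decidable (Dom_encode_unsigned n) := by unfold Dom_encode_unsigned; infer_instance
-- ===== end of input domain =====

-- B replaces A's destructive shift loop with a closed-form digit count from bit_length and indexed extraction of the 5-bit groups; objective: alternative.

-- ===== PORT A =====
-- the while loop: collects the low-5-bit chunks; n & 31 = mod n 32 and n >> 5 = floordiv n 32
-- (exact for every Python int); Python's `c | 32` is PySem.Int.bor (two's complement), exact for every int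
def pvEncLoopA (n : Int) (tmp : List Int) : List Int × Int :=
  if _h : 32 ≤ n then
    pvEncLoopA (PySem.Int.floordiv n 32) (tmp ++ [PySem.Int.mod n 32])
  else (tmp, n)
termination_by n.toNat
decreasing_by
  rw [PySem.Int.floordiv_eq_ediv_of_pos (by omega)]
  omega

def encode_unsigned (n : Int) : String :=
  let p := pvEncLoopA n []
  let tmp2 : List Int := p.1.map (fun c => PySem.Int.bor c 32) ++ [p.2]
  let chars : List Char := tmp2.map (fun i : Int => Char.ofNat (i + 63).toNat)
  String.ofList chars

-- ===== PORT B =====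
-- closed-form digit count k = (bit_length + 4) // 5 (PySem.Int.bitLength = Python's bit_length),
-- then indexed extraction of each 5-bit group from the untouched n; Python's n >> j is Lean's n >>> j
-- and n & 31 is PySem.Int.band, both exact
def encode_unsigned_alt (n : Int) : String :=
  if n < 32 then String.ofList [Char.ofNat (n + 63).toNat]
  else
    let k := (PySem.Int.bitLength n + 4) / 5
    let body := (List.range (k - 1)).map (fun i =>
      Char.ofNat ((PySem.Int.band (n >>> (5 * i : Nat)) 31) + 95).toNat)
    String.ofList (body ++ [Char.ofNat ((n >>> (5 * (k - 1))) + 63).toNat])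

-- ===== PRECONDITION & SPEC =====
-- Pre_ excludes exactly the inputs n < -63, on which Python's final chr(n + 63) gets a negative
-- code point and raises ValueError (in A and in B alike)
def Pre_encode_unsigned (n : Int) : Prop := -63 ≤ n
instance (n : Int) : Decidable (Pre_encode_unsigned n) := by unfold Pre_encode_unsigned; infer_instance
def pvWitness_encode_unsigned : Int := (174)

def Spec_encode_unsigned (n : Int) (out : String) : Prop := out = encode_unsigned_alt n
instance (n : Int) (out : String) : Decidable (Spec_encode_unsigned n out) := by unfold Spec_encode_unsigned; infer_instance

-- ===== CLAIM (what is proved, stated in full; the proofs are below) =====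
def Claim_equal_encode_unsigned : Prop := ∀ (n : Int), Dom_encode_unsigned n → Pre_encode_unsigned n → Spec_encode_unsigned n (encode_unsigned n)

-- ===== LEMMAS AND PROOFS =====

-- the char A produces for a continuation chunk c (after `| 32` and `chr(i + 63)`)
def pvChunkChar (c : Int) : Char := Char.ofNat ((PySem.Int.bor c 32) + 63).toNat

-- common reference list: the base-32 little-endian digits of m, continuation chars then residual
def pvBlist (m : Nat) : List Char :=
  if m < 32 then [Char.ofNat (m + 63)]
  else Char.ofNat (m % 32 + 95) :: pvBlist (m / 32)
termination_by m
decreasing_by exact Nat.div_lt_self (by omega) (by norm_num)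

theorem pvChunkChar_small (c : Int) (h0 : 0 ≤ c) (h1 : c < 32) :
    pvChunkChar c = Char.ofNat (c.toNat + 95) := by
  interval_cases c <;> rfl

-- A's collected chunks mapped through pvChunkChar, plus the residual char, equal pvBlist
theorem pvEncA_blist (k : Nat) (n : Int) (hk : n.toNat ≤ k) (hn : 0 ≤ n) (tmp : List Int) :
    (pvEncLoopA n tmp).1.map pvChunkChar ++ [Char.ofNat ((pvEncLoopA n tmp).2 + 63).toNat]
      = tmp.map pvChunkChar ++ pvBlist n.toNat := by
  induction k generalizing n tmp with
  | zero =>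
    rw [pvEncLoopA.eq_def, dif_neg (by omega)]
    rw [pvBlist, if_pos (by omega)]
    have h63 : (n + 63).toNat = n.toNat + 63 := by omega
    simp [h63]
  | succ k ih =>
    by_cases h : 32 ≤ n
    · have hfd : PySem.Int.floordiv n 32 = n / 32 := PySem.Int.floordiv_eq_ediv_of_pos (by omega)
      have hmd : PySem.Int.mod n 32 = n % 32 := PySem.Int.mod_eq_emod_of_pos (by omega)
      rw [pvEncLoopA.eq_def, dif_pos h]
      rw [ih (PySem.Int.floordiv n 32) (by rw [hfd]; omega) (by rw [hfd]; omega)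
            (tmp ++ [PySem.Int.mod n 32])]
      have hstep : pvBlist n.toNat = Char.ofNat (n.toNat % 32 + 95) :: pvBlist (n.toNat / 32) := by
        rw [pvBlist, if_neg (by omega)]
      have hchunk : pvChunkChar (PySem.Int.mod n 32) = Char.ofNat (n.toNat % 32 + 95) := by
        rw [hmd, pvChunkChar_small _ (by omega) (by omega)]
        congr 1
        omega
      have hq : (PySem.Int.floordiv n 32).toNat = n.toNat / 32 := by rw [hfd]; omega
      rw [List.map_append, List.append_assoc, hstep, hq, List.map_cons, List.map_nil,
        List.singleton_append, hchunk]
    · rw [pvEncLoopA.eq_def, dif_neg h]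
      rw [pvBlist, if_pos (by omega)]
      have h63 : (n + 63).toNat = n.toNat + 63 := by omega
      simp [h63]

-- bit-length bounds for a Nat, in the shape the digit-count arithmetic needs
theorem pvBitLen_bounds (m : Nat) (hm : 1 ≤ m) :
    2 ^ (PySem.Int.bitLength (m : Int) - 1) ≤ m ∧ m < 2 ^ PySem.Int.bitLength (m : Int) := by
  refine ⟨?_, ?_⟩
  · have := PySem.Int.two_pow_bitLength_le (n := (m : Int)) (Int.natCast_ne_zero.mpr (by omega))
    simpa using this
  · have := PySem.Int.lt_two_pow_bitLength (n := (m : Int))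
    simpa using this

theorem pvBitLen_div32 (m : Nat) (hm : 32 ≤ m) :
    PySem.Int.bitLength ((m / 32 : Nat) : Int) = PySem.Int.bitLength (m : Int) - 5 ∧
    6 ≤ PySem.Int.bitLength (m : Int) := by
  obtain ⟨hlo, hhi⟩ := pvBitLen_bounds m (by omega)
  obtain ⟨hlo', hhi'⟩ := pvBitLen_bounds (m / 32) (by omega)
  have hpow : (1 : Nat) < 2 := by norm_num
  -- 6 ≤ s : 2^5 ≤ m < 2^s
  have h6 : 6 ≤ PySem.Int.bitLength (m : Int) := by
    have : (2 : Nat) ^ 5 < 2 ^ PySem.Int.bitLength (m : Int) := by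
      calc (2 : Nat) ^ 5 = 32 := by norm_num
        _ ≤ m := hm
        _ < _ := hhi
    have := (Nat.pow_lt_pow_iff_right hpow).mp this
    omega
  refine ⟨?_, h6⟩
  -- upper: m / 32 < 2 ^ (s - 5)
  have hub : m / 32 < 2 ^ (PySem.Int.bitLength (m : Int) - 5) := by
    rw [Nat.div_lt_iff_lt_mul (by norm_num)]
    calc m < 2 ^ PySem.Int.bitLength (m : Int) := hhi
      _ = 2 ^ (PySem.Int.bitLength (m : Int) - 5) * 32 := by
          rw [show (32 : Nat) = 2 ^ 5 from rfl, ← pow_add]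
          congr 1
          omega
  -- lower: 2 ^ (s - 6) ≤ m / 32
  have hlb : 2 ^ (PySem.Int.bitLength (m : Int) - 6) ≤ m / 32 := by
    rw [Nat.le_div_iff_mul_le (by norm_num)]
    calc 2 ^ (PySem.Int.bitLength (m : Int) - 6) * 32
        = 2 ^ (PySem.Int.bitLength (m : Int) - 1) := by
          rw [show (32 : Nat) = 2 ^ 5 from rfl, ← pow_add]
          congr 1
          omega
      _ ≤ m := hlo
  have h1 : PySem.Int.bitLength ((m / 32 : Nat) : Int) ≤ PySem.Int.bitLength (m : Int) - 5 := by
    by_contra hcon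
    have : 2 ^ (PySem.Int.bitLength (m : Int) - 5) ≤ 2 ^ (PySem.Int.bitLength ((m / 32 : Nat) : Int) - 1) :=
      Nat.pow_le_pow_right (by norm_num) (by omega)
    omega
  have h2 : PySem.Int.bitLength (m : Int) - 5 ≤ PySem.Int.bitLength ((m / 32 : Nat) : Int) := by
    by_contra hcon
    have : 2 ^ PySem.Int.bitLength ((m / 32 : Nat) : Int) ≤ 2 ^ (PySem.Int.bitLength (m : Int) - 6) :=
      Nat.pow_le_pow_right (by norm_num) (by omega)
    omega
  omega

-- B's body for n = ↑m, with all Int bit operations turned into Nat division/mod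
def pvBbody (m : Nat) : List Char :=
  (List.range ((PySem.Int.bitLength (m : Int) + 4) / 5 - 1)).map
      (fun i => Char.ofNat (m / 2 ^ (5 * i) % 32 + 95))
    ++ [Char.ofNat (m / 2 ^ (5 * ((PySem.Int.bitLength (m : Int) + 4) / 5 - 1)) + 63)]

theorem pvBandShift (m j : Nat) :
    PySem.Int.band ((m : Int) >>> j) 31 = ((m / 2 ^ j % 32 : Nat) : Int) := by
  have h1 : ((m : Int) >>> j) = ((m >>> j : Nat) : Int) := rfl
  rw [h1]
  have h2 := PySem.Int.band_of_nonneg (a := ((m >>> j : Nat) : Int)) (b := 31)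
    (by positivity) (by norm_num)
  rw [h2]
  have h3 := Nat.and_two_pow_sub_one_eq_mod (m >>> j) 5
  norm_num at h3
  have h4 : (31 : Int).toNat = 31 := rfl
  rw [h4, Int.toNat_natCast, h3, Nat.shiftRight_eq_div_pow]

theorem pvAlt_bbody (n : Int) (h : 32 ≤ n) :
    encode_unsigned_alt n = String.ofList (pvBbody n.toNat) := by
  obtain ⟨m, hm⟩ : ∃ m : Nat, n = (m : Int) := ⟨n.toNat, (Int.toNat_of_nonneg (by omega)).symm⟩
  subst hm
  rw [encode_unsigned_alt, if_neg (by omega)]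
  simp only [Int.toNat_natCast]
  unfold pvBbody
  congr 1
  congr 1
  · refine List.map_congr_left (fun i _ => ?_)
    rw [pvBandShift]
    generalize m / 2 ^ (5 * i) % 32 = q
    congr 1
  · have h1 : ((m : Int) >>> (5 * ((PySem.Int.bitLength (m : Int) + 4) / 5 - 1)))
        = ((m >>> (5 * ((PySem.Int.bitLength (m : Int) + 4) / 5 - 1)) : Nat) : Int) := rfl
    rw [h1, Nat.shiftRight_eq_div_pow]
    generalize m / 2 ^ (5 * ((PySem.Int.bitLength (m : Int) + 4) / 5 - 1)) = q
    congr 1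

theorem pvDivShift (m i : Nat) : m / 2 ^ (5 * (i + 1)) = m / 32 / 2 ^ (5 * i) := by
  rw [Nat.div_div_eq_div_mul, show (32 : Nat) = 2 ^ 5 from rfl, ← pow_add]
  congr 2
  omega

theorem pvBbody_blist (m : Nat) (hm : 32 ≤ m) : pvBbody m = pvBlist m := by
  induction m using Nat.strong_induction_on with
  | _ m ih =>
    obtain ⟨hlo, hhi⟩ := pvBitLen_bounds m (by omega)
    obtain ⟨hdiv, h6⟩ := pvBitLen_div32 m hm
    have hstep : pvBlist m = Char.ofNat (m % 32 + 95) :: pvBlist (m / 32) := by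
      rw [pvBlist, if_neg (by omega)]
    by_cases h32 : m / 32 < 32
    · -- exactly two digits: bit length is in [6, 10]
      have hs10 : PySem.Int.bitLength (m : Int) ≤ 10 := by
        have hm' : m < 1024 := by
          have := (Nat.div_lt_iff_lt_mul (by norm_num : 0 < 32)).mp h32
          omega
        by_contra hcon
        have : (2 : Nat) ^ 10 ≤ 2 ^ (PySem.Int.bitLength (m : Int) - 1) :=
          Nat.pow_le_pow_right (by norm_num) (by omega)
        norm_num at this
        omega
      have hk : (PySem.Int.bitLength (m : Int) + 4) / 5 - 1 = 1 := by omega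
      rw [pvBbody, hk, hstep, pvBlist, if_pos h32]
      norm_num
    · -- recurse on m / 32
      rw [Nat.not_lt] at h32
      obtain ⟨_, h6'⟩ := pvBitLen_div32 (m / 32) h32
      have hs11 : 11 ≤ PySem.Int.bitLength (m : Int) := by omega
      have hk' : (PySem.Int.bitLength ((m / 32 : Nat) : Int) + 4) / 5
          = (PySem.Int.bitLength (m : Int) + 4) / 5 - 1 := by
        rw [hdiv]
        omega
      have hkpos : 2 ≤ (PySem.Int.bitLength (m : Int) + 4) / 5 - 1 := by omega
      have hpeel : (PySem.Int.bitLength (m : Int) + 4) / 5 - 1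
          = ((PySem.Int.bitLength (m : Int) + 4) / 5 - 2) + 1 := by omega
      rw [pvBbody, hstep, ← ih (m / 32) (Nat.div_lt_self (by omega) (by norm_num)) h32, pvBbody,
        hk', hpeel, List.range_succ_eq_map, List.map_cons, List.map_map]
      have hres : m / 2 ^ (5 * (((PySem.Int.bitLength (m : Int) + 4) / 5 - 2) + 1))
          = m / 32 / 2 ^ (5 * ((PySem.Int.bitLength (m : Int) + 4) / 5 - 2)) := pvDivShift m _
      have hmap : (List.range ((PySem.Int.bitLength (m : Int) + 4) / 5 - 2)).map
            ((fun i => Char.ofNat (m / 2 ^ (5 * i) % 32 + 95)) ∘ Nat.succ)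
          = (List.range ((PySem.Int.bitLength (m : Int) + 4) / 5 - 2)).map
            (fun i => Char.ofNat (m / 32 / 2 ^ (5 * i) % 32 + 95)) := by
        refine List.map_congr_left (fun i _ => ?_)
        simp only [Function.comp_apply]
        rw [show Nat.succ i = i + 1 from rfl, pvDivShift m i]
      rw [hmap, hres]
      simp

-- ===== VERDICT (by name: the statement is the Claim_ definition above) =====
theorem encode_unsigned_spec : Claim_equal_encode_unsigned := by
  intro n _ hpre
  show _ = _
  by_cases h : 32 ≤ n
  · have hA := pvEncA_blist n.toNat n le_rfl (by omega) []
    simp only [List.map_nil, List.nil_append] at hA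
    rw [pvAlt_bbody n h, pvBbody_blist n.toNat (by omega), encode_unsigned]
    simp only [List.map_append, List.map_map, List.map_cons, List.map_nil]
    rw [← hA]
    rfl
  · rw [encode_unsigned, encode_unsigned_alt, if_pos (by omega)]
    rw [pvEncLoopA.eq_def, dif_neg h]
    rfl
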